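-- pv_equiv track=rewrite | github.com/leetcode-notes/CSE20-Projects | Assignment_5/histogram.py | getMaxMode
-- ===== SOURCE A (Python) =====
-- def getMaxMode(lis):
--     mode = 0
--     newlis = [i//10 * 10 for i in lis]
--     counter = 0
--     for i in newlis:
--         curr = newlis.count(i)
--         if(curr>counter):
--             counter = curr
--             mode = i
--
--     return int(counter)
-- ===== SOURCE B (Python) =====
-- def getMaxMode(lis):
--     newlis = sorted(i // 10 * 10 for i in lis)
--     prev = None
--     run = 0
--     best = 0
--     for v in newlis:
--         if prev == v:
--             run += 1
--         else:
--             run = 1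
--             prev = v
--         if run > best:
--             best = run
--     return int(best)
-- ===== Notes on version B (the rewrite author's own statement) =====
-- stated objective: faster
-- what changed: B sorts the bucketed values and finds the longest run in one linear scan over the sorted list, instead of A's per-element newlis.count inner scan.
import Mathlib
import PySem

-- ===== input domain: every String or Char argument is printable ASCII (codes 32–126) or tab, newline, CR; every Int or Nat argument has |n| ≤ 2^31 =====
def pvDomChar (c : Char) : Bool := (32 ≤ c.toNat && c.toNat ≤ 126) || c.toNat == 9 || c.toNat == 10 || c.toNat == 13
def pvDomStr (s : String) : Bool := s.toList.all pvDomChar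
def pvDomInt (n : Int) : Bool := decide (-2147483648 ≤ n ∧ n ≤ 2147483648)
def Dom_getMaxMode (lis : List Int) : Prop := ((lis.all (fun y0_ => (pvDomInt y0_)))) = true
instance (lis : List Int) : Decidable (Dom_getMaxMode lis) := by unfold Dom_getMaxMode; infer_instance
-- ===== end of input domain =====

-- B sorts the bucketed values and finds the longest run in one linear scan, instead of A's per-element count scan (alternative algorithm).

-- ===== PORT A =====
def getMaxMode (lis : List Int) : Int :=
  let newlis := lis.map (fun i => PySem.Int.floordiv i 10 * 10)
  let st := newlis.foldl (fun (mc : Int × Int) i =>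
      let curr : Int := PySem.List.count newlis i
      if curr > mc.2 then (i, curr) else mc) (0, 0)
  st.2

-- ===== PORT B =====
def getMaxMode_alt (lis : List Int) : Int :=
  let newlis := PySem.List.sorted (lis.map (fun i => PySem.Int.floordiv i 10 * 10)) (fun x => x) false
  let st := newlis.foldl (fun (s : Option Int × Int × Int) v =>
      let run' := if s.1 = some v then s.2.1 + 1 else 1
      let best' := if run' > s.2.2 then run' else s.2.2
      (some v, run', best')) (none, 0, 0)
  st.2.2

-- ===== PRECONDITION & SPEC =====
def Spec_getMaxMode (lis : List Int) (out : Int) : Prop := out = getMaxMode_alt lis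
instance (lis : List Int) (out : Int) : Decidable (Spec_getMaxMode lis out) := by unfold Spec_getMaxMode; infer_instance

-- ===== CLAIM =====
def Claim_equal_getMaxMode : Prop := ∀ (lis : List Int), Dom_getMaxMode lis → Spec_getMaxMode lis (getMaxMode lis)

-- ===== LEMMAS AND PROOFS =====

-- running maximum of g over a list
def pvF (g : Int → Int) (l : List Int) (a : Int) : Int :=
  l.foldl (fun c x => max c (g x)) a

theorem pvF_cons (g : Int → Int) (x : Int) (l : List Int) (a : Int) :
    pvF g (x :: l) a = pvF g l (max a (g x)) := rfl

theorem le_pvF (g : Int → Int) (l : List Int) (a : Int) : a ≤ pvF g l a := by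
  induction l generalizing a with
  | nil => simp [pvF]
  | cons x t ih => rw [pvF_cons]; exact le_trans (le_max_left _ _) (ih _)

theorem mem_le_pvF (g : Int → Int) (l : List Int) (a : Int) {x : Int} (hx : x ∈ l) :
    g x ≤ pvF g l a := by
  induction l generalizing a with
  | nil => cases hx
  | cons y t ih =>
      rw [pvF_cons]
      rcases List.mem_cons.1 hx with h | h
      · subst h; exact le_trans (le_max_right _ _) (le_pvF g t _)
      · exact ih _ h

theorem pvF_eq_or (g : Int → Int) (l : List Int) (a : Int) :
    pvF g l a = a ∨ ∃ x ∈ l, pvF g l a = g x := by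
  induction l generalizing a with
  | nil => exact Or.inl rfl
  | cons y t ih =>
      rw [pvF_cons]
      rcases ih (max a (g y)) with h | ⟨x, hx, h⟩
      · rw [h]
        rcases le_total a (g y) with hc | hc
        · exact Or.inr ⟨y, List.mem_cons_self, by omega⟩
        · left; omega
      · exact Or.inr ⟨x, List.mem_cons_of_mem _ hx, h⟩

theorem pvF_congr_mem (g : Int → Int) (l₁ l₂ : List Int)
    (h : ∀ x, x ∈ l₁ ↔ x ∈ l₂) : pvF g l₁ 0 = pvF g l₂ 0 := by
  refine le_antisymm ?_ ?_ <;>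
  · rcases pvF_eq_or g _ 0 with he | ⟨x, hx, he⟩
    · rw [he]; exact le_pvF g _ 0
    · rw [he]
      first
        | exact mem_le_pvF g _ 0 ((h x).1 hx)
        | exact mem_le_pvF g _ 0 ((h x).2 hx)

theorem pvF_congr_fun (g g' : Int → Int) (l : List Int) (a : Int)
    (h : ∀ x ∈ l, g x = g' x) : pvF g l a = pvF g' l a := by
  induction l generalizing a with
  | nil => rfl
  | cons y t ih =>
      rw [pvF_cons, pvF_cons, h y List.mem_cons_self]
      exact ih _ (fun x hx => h x (List.mem_cons_of_mem _ hx))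

theorem pvF_max (g : Int → Int) (l : List Int) (a c : Int) :
    pvF g l (max a c) = max (pvF g l a) c := by
  induction l generalizing a with
  | nil => rfl
  | cons y t ih =>
      rw [pvF_cons, pvF_cons]
      have : max (max a c) (g y) = max (max a (g y)) c := by omega
      rw [this, ih]

-- A's fold: second component is the running max of counts
theorem A_snd_eq_pvF (full l : List Int) (m c : Int) :
    (l.foldl (fun (mc : Int × Int) i =>
        let curr : Int := PySem.List.count full i
        if curr > mc.2 then (i, curr) else mc) (m, c)).2
      = pvF (fun i => (PySem.List.count full i : Int)) l c := by
  induction l generalizing m c with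
  | nil => rfl
  | cons x t ih =>
      simp only [List.foldl_cons, pvF_cons]
      split <;> rename_i hc
      · rw [ih]; congr 1; omega
      · rw [ih]; congr 1; omega

-- B's scan, abbreviated (definitionally the fold in getMaxMode_alt)
def pvScan (l : List Int) (s : Option Int × Int × Int) : Option Int × Int × Int :=
  l.foldl (fun (s : Option Int × Int × Int) v =>
      let run' := if s.1 = some v then s.2.1 + 1 else 1
      let best' := if run' > s.2.2 then run' else s.2.2
      (some v, run', best')) s

theorem pvIteMax (a c : Int) : (if c > a then c else a) = max a c := by
  split <;> omega

theorem pvScan_cons (l : List Int) (v : Int) (p : Option Int) (r b : Int) :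
    pvScan (v :: l) (p, r, b)
      = pvScan l (some v, if p = some v then r + 1 else 1,
          max b (if p = some v then r + 1 else 1)) := by
  simp only [pvScan, List.foldl_cons, pvIteMax]

theorem pvCountConsInt (a b : Int) (l : List Int) :
    ((b :: l).count a : Int) = (l.count a : Int) + (if a = b then 1 else 0) := by
  by_cases h : a = b
  · subst h; simp
  · simp [Ne.symm h, h]

-- core invariant: on a sorted suffix s with carry (p, r), the scan's best is the
-- running max of (count in s) + carry over s, joined with b
theorem pvScan_best (s : List Int) (hs : s.Pairwise (· ≤ ·)) (p r b : Int)
    (hp : ∀ y ∈ s, p ≤ y) (hrb : r ≤ b) :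
    (pvScan s (some p, r, b)).2.2
      = pvF (fun x => (s.count x : Int) + if x = p then r else 0) s b := by
  induction s generalizing p r b with
  | nil => rfl
  | cons y t ih =>
      have hy : ∀ z ∈ t, y ≤ z := fun z hz => (List.pairwise_cons.1 hs).1 z hz
      have ht : t.Pairwise (· ≤ ·) := (List.pairwise_cons.1 hs).2
      have hpy : p ≤ y := hp y List.mem_cons_self
      rw [pvScan_cons]
      set r' : Int := if (some p : Option Int) = some y then r + 1 else 1 with hr'
      rw [ih ht y r' (max b r') hy (by rw [hr']; split <;> [omega; omega])]
      set g' : Int → Int := fun x => (t.count x : Int) + if x = y then r' else 0 with hg'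
      have hgy : ((y :: t).count y : Int) + (if y = p then r else 0)
          = g' y := by
        rw [hg']
        simp only [pvCountConsInt, hr']
        by_cases h : p = y
        · simp [h]; omega
        · have h' : y ≠ p := fun hh => h hh.symm
          simp [h, h']
      have hfun : ∀ x ∈ t,
          ((y :: t).count x : Int) + (if x = p then r else 0) = g' x := by
        intro x hx
        rw [hg']
        by_cases hxy : x = y
        · subst hxy
          simp only [pvCountConsInt, hr']
          by_cases h : p = x
          · simp [h]; omega
          · have h' : x ≠ p := fun hh => h hh.symm
            simp [h, h']
        · have hxp : x ≠ p := by
            intro hxp; subst hxp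
            have := hy x hx
            omega
          simp only [pvCountConsInt, if_neg hxy, if_neg hxp]
          omega
      rw [pvF_cons, pvF_congr_fun _ g' _ _ hfun, hgy]
      -- base: max b (g' y) versus max b r'
      have hgyv : g' y = (t.count y : Int) + r' := by simp [hg']
      have h1 : max b (g' y) = max (max b r') (g' y) := by
        have h0 : (0:Int) ≤ (t.count y : Int) := Int.natCast_nonneg _
        rw [hgyv]; omega
      have h2 : pvF g' t (max (max b r') (g' y)) = max (pvF g' t (max b r')) (g' y) :=
        pvF_max g' t (max b r') (g' y)
      rw [h1, h2]
      have hle : g' y ≤ pvF g' t (max b r') := by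
        by_cases hc : t.count y = 0
        · rw [hgyv, hc]
          exact le_trans (by omega) (le_trans (le_max_right _ _) (le_pvF g' t _))
        · exact mem_le_pvF g' t _ (List.count_pos_iff.1 (Nat.pos_of_ne_zero hc))
      omega

-- top level: scan from the empty state on a sorted list = running max of counts
theorem pvScan_sorted (s : List Int) (hs : s.Pairwise (· ≤ ·)) :
    (pvScan s ((none : Option Int), 0, 0)).2.2
      = pvF (fun x => (s.count x : Int)) s 0 := by
  cases s with
  | nil => rfl
  | cons y t =>
      have hy : ∀ z ∈ t, y ≤ z := fun z hz => (List.pairwise_cons.1 hs).1 z hz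
      have ht : t.Pairwise (· ≤ ·) := (List.pairwise_cons.1 hs).2
      rw [pvScan_cons]
      have h0 : ((none : Option Int) = some y) = False := by simp
      simp only [h0, if_false]
      have hmax : max (0:Int) 1 = 1 := by omega
      rw [hmax, pvScan_best t ht y 1 1 hy le_rfl, pvF_cons]
      set g' : Int → Int := fun x => (t.count x : Int) + if x = y then 1 else 0 with hg'
      have hfun : ∀ x ∈ t, ((y :: t).count x : Int) = g' x := by
        intro x hx
        rw [hg']
        by_cases hxy : x = y
        · subst hxy; simp
        · simp [pvCountConsInt, hxy]
      have hgy : ((y :: t).count y : Int) = g' y := by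
        simp [hg']
      rw [pvF_congr_fun _ g' _ _ hfun, hgy]
      have hgyv : g' y = (t.count y : Int) + 1 := by simp [hg']
      have h0' : (0:Int) ≤ (t.count y : Int) := Int.natCast_nonneg _
      have h1 : max (0:Int) (g' y) = max (max (0:Int) 1) (g' y) := by omega
      have hm01 : max (0:Int) 1 = 1 := by omega
      rw [h1, hm01, pvF_max]
      have hle : g' y ≤ pvF g' t 1 := by
        by_cases hc : t.count y = 0
        · have : g' y = 1 := by rw [hgyv, hc]; simp
          rw [this]; exact le_pvF g' t 1
        · exact mem_le_pvF g' t _ (List.count_pos_iff.1 (Nat.pos_of_ne_zero hc))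
      omega

-- ===== VERDICT =====
theorem getMaxMode_spec : Claim_equal_getMaxMode := by
  intro lis _
  unfold Spec_getMaxMode getMaxMode getMaxMode_alt
  simp only []
  set f : Int → Int := fun i => PySem.Int.floordiv i 10 * 10 with hf
  set newlis := lis.map f with hn
  set s' := PySem.List.sorted newlis (fun x => x) false with hs'
  have hperm : s'.Perm newlis := PySem.List.sorted_perm newlis (fun x => x) false
  have hpair : s'.Pairwise (· ≤ ·) := by
    have := PySem.List.sorted_pairwise (xs := newlis) (key := fun x => x)
    simpa using this
  rw [A_snd_eq_pvF]
  show pvF (fun i => (PySem.List.count newlis i : Int)) newlis 0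
      = (pvScan s' (none, 0, 0)).2.2
  rw [pvScan_sorted s' hpair]
  have hcount : ∀ v : Int, PySem.List.count newlis v = (newlis.count v : Int) := by
    intro v; simp [PySem.List.count_eq]
  calc pvF (fun i => (PySem.List.count newlis i : Int)) newlis 0
      = pvF (fun i => (newlis.count i : Int)) newlis 0 := by
        exact pvF_congr_fun _ _ _ _ (fun x _ => by rw [hcount])
    _ = pvF (fun i => (newlis.count i : Int)) s' 0 :=
        pvF_congr_mem _ _ _ (fun x => ⟨fun h => hperm.mem_iff.2 h, fun h => hperm.mem_iff.1 h⟩)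
    _ = pvF (fun i => (s'.count i : Int)) s' 0 :=
        pvF_congr_fun _ _ _ _ (fun x _ => by rw [hperm.count_eq])
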